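-- pv_equiv track=rewrite | github.com/shuw/euler | python/p30.py | sorteddigits
-- ===== SOURCE A (Python) =====
-- def sorteddigits(n):
--     d = []
--     while n > 0:
--         d.append(n % 10)
--         n = int(n / 10)
--
--     d.sort()
--     d.reverse()
--     return d
-- ===== SOURCE B (Python) =====
-- def sorteddigits(n):
--     counts = [0] * 10
--     while n > 0:
--         counts[n % 10] += 1
--         n = int(n / 10)
--     out = []
--     for v in range(9, -1, -1):
--         out.extend([v] * counts[v])
--     return out
-- ===== Notes on version B (the rewrite author's own statement) =====
-- stated objective: alternative
-- what changed: B replaces A's append-then-comparison-sort-then-reverse by a counting sort: it increments a 10-slot counts array while extracting digits with the same n%10 / int(n/10) loop, then emits each digit value from 9 down to 0 counts[v] times.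
import Mathlib
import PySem

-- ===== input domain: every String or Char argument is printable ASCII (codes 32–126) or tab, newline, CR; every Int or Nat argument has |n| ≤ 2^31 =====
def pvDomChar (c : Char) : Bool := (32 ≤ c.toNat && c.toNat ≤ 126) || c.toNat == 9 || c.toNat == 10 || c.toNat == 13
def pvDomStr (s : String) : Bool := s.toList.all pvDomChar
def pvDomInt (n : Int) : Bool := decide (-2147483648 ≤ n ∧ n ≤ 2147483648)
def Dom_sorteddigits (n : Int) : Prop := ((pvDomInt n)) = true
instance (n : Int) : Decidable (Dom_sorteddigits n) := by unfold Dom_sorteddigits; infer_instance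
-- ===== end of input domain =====

-- B replaces A's comparison sort + reverse by a counting sort over the 10 digit values (alternative decomposition).

-- termination helper for both loops (cited by decreasing_by)
theorem pvTruncdivTen_lt (n : Int) (h : 0 < n) :
    (PySem.Int.truncdiv n 10).toNat < n.toNat := by
  have : PySem.Int.truncdiv n 10 = n / 10 := Int.tdiv_eq_ediv_of_nonneg (by omega)
  omega

-- ===== PORT A =====
-- while n > 0: d.append(n % 10); n = int(n / 10)
def pvDigitsA (n : Int) : List Int :=
  if h : 0 < n then
    PySem.Int.mod n 10 :: pvDigitsA (PySem.Int.truncdiv n 10)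
  else []
termination_by n.toNat
decreasing_by exact pvTruncdivTen_lt n h

def sorteddigits (n : Int) : List Int :=
  ((PySem.List.sorted (pvDigitsA n) (fun x => x) false)).reverse

-- ===== PORT B =====
-- while n > 0: counts[n % 10] += 1; n = int(n / 10)
def pvCountLoop (n : Int) (counts : List Int) : List Int :=
  if h : 0 < n then
    pvCountLoop (PySem.Int.truncdiv n 10)
      (PySem.List.pySetD counts (PySem.Int.mod n 10)
        (PySem.List.pyGetD counts (PySem.Int.mod n 10) 0 + 1))
  else counts
termination_by n.toNat
decreasing_by exact pvTruncdivTen_lt n h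

def sorteddigits_alt (n : Int) : List Int :=
  let counts := pvCountLoop n (PySem.List.pyRepeat [0] 10)
  (PySem.List.pyRange 9 (-1) (-1)).foldl
    (fun out v => out ++ PySem.List.pyRepeat [v] (PySem.List.pyGetD counts v 0)) []

-- ===== PRECONDITION & SPEC =====
def Spec_sorteddigits (n : Int) (out : List Int) : Prop := out = sorteddigits_alt n
instance (n : Int) (out : List Int) : Decidable (Spec_sorteddigits n out) := by unfold Spec_sorteddigits; infer_instance

-- ===== CLAIM (what is proved, stated in full; the proofs are below) =====
def Claim_equal_sorteddigits : Prop := ∀ (n : Int), Dom_sorteddigits n → Spec_sorteddigits n (sorteddigits n)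

-- ===== LEMMAS AND PROOFS =====

-- every extracted digit lies in [0, 10)
theorem pvDigitsA_mem (n : Int) : ∀ x ∈ pvDigitsA n, 0 ≤ x ∧ x < 10 := by
  fun_induction pvDigitsA n with
  | case1 n h ih =>
      intro x hx
      rcases List.mem_cons.mp hx with rfl | hx
      · exact ⟨PySem.Int.mod_nonneg n (by omega), PySem.Int.mod_lt n (by omega)⟩
      · exact ih x hx
  | case2 n h => intro x hx; simp at hx

-- the counting loop is the fold of the increment over the digit list
theorem pvCountLoop_eq_foldl (n : Int) (c : List Int) :
    pvCountLoop n c =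
      (pvDigitsA n).foldl
        (fun c x => PySem.List.pySetD c x (PySem.List.pyGetD c x 0 + 1)) c := by
  fun_induction pvCountLoop n c with
  | case1 n c h ih => rw [pvDigitsA, dif_pos h, List.foldl_cons]; exact ih
  | case2 n c h => rw [pvDigitsA, dif_neg h]; rfl

-- counts read-back: the fold of increments adds each value's multiplicity
theorem pvFoldCount (l : List Int) (hl : ∀ x ∈ l, 0 ≤ x ∧ x < 10) :
    ∀ (c : List Int), c.length = 10 → ∀ v : Int, 0 ≤ v → v < 10 →
      PySem.List.pyGetD
        (l.foldl (fun c x => PySem.List.pySetD c x (PySem.List.pyGetD c x 0 + 1)) c) v 0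
      = PySem.List.pyGetD c v 0 + (l.count v : Int) := by
  induction l with
  | nil => intro c hc v h0 h1; simp
  | cons x l ih =>
      intro c hc v h0 h1
      obtain ⟨hx0, hx1⟩ := hl x (List.mem_cons_self)
      have hxc : x = ((x.toNat : Nat) : Int) := (Int.toNat_of_nonneg hx0).symm
      have hvc : v = ((v.toNat : Nat) : Int) := (Int.toNat_of_nonneg h0).symm
      have hlen : x.toNat < c.length := by omega
      rw [List.foldl_cons,
          ih (fun y hy => hl y (List.mem_cons_of_mem _ hy)) _
            (by rw [hxc, PySem.List.pySetD_natCast, List.length_set]; exact hc) v h0 h1,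
          List.count_cons]
      rw [hxc, hvc, PySem.List.pyGetD_pySetD_natCast c x.toNat v.toNat _ 0 hlen]
      by_cases hvx : v.toNat = x.toNat
      · rw [if_pos hvx, if_pos (by simp [beq_iff_eq]; omega), ← hvc]
        rw [show ((x.toNat : Nat) : Int) = v by omega]
        push_cast
        ring
      · rw [if_neg hvx, if_neg (by simp [beq_iff_eq]; omega)]
        simp

set_option maxHeartbeats 1000000 in
theorem pvMain (n : Int) : sorteddigits n = sorteddigits_alt n := by
  unfold sorteddigits sorteddigits_alt
  set d := pvDigitsA n with hd
  have hcount : ∀ v : Int, 0 ≤ v → v < 10 →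
      PySem.List.pyGetD (pvCountLoop n (PySem.List.pyRepeat [0] 10)) v 0 = (d.count v : Int) := by
    intro v h0 h1
    rw [pvCountLoop_eq_foldl, PySem.List.pyRepeat_singleton]
    rw [pvFoldCount d (pvDigitsA_mem n) _ (by simp) v h0 h1]
    have hvc : v = ((v.toNat : Nat) : Int) := (Int.toNat_of_nonneg h0).symm
    rw [hvc, PySem.List.pyGetD_natCast]
    have h10 : v.toNat < 10 := by omega
    simp only [List.getD_eq_getElem?_getD]
    interval_cases v.toNat <;> simp
  have hmem : ∀ x ∈ d, 0 ≤ x ∧ x < 10 := pvDigitsA_mem n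
  clear_value d
  have hrange : PySem.List.pyRange 9 (-1) (-1) = [9,8,7,6,5,4,3,2,1,0] := by decide
  rw [hrange]
  simp only [List.foldl_cons, List.foldl_nil, List.nil_append]
  rw [hcount 0 (by omega) (by omega), hcount 1 (by omega) (by omega),
      hcount 2 (by omega) (by omega), hcount 3 (by omega) (by omega),
      hcount 4 (by omega) (by omega), hcount 5 (by omega) (by omega),
      hcount 6 (by omega) (by omega), hcount 7 (by omega) (by omega),
      hcount 8 (by omega) (by omega), hcount 9 (by omega) (by omega)]
  simp only [PySem.List.pyRepeat_singleton, Int.toNat_natCast]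
  have hsorted : PySem.List.sorted d (fun x => x) false =
      List.replicate (d.count 0) 0 ++ List.replicate (d.count 1) 1 ++
      List.replicate (d.count 2) 2 ++ List.replicate (d.count 3) 3 ++
      List.replicate (d.count 4) 4 ++ List.replicate (d.count 5) 5 ++
      List.replicate (d.count 6) 6 ++ List.replicate (d.count 7) 7 ++
      List.replicate (d.count 8) 8 ++ List.replicate (d.count 9) 9 := by
    apply PySem.List.sorted_id_eq_of_perm_of_pairwise
    · rw [List.perm_iff_count]
      intro a
      simp only [List.count_append, List.count_replicate, beq_iff_eq]
      by_cases ha : 0 ≤ a ∧ a < 10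
      · obtain ⟨h0, h1⟩ := ha
        interval_cases a <;> simp
      · have h0 : d.count a = 0 :=
          List.count_eq_zero_of_not_mem (fun hm => by have := hmem a hm; omega)
        rw [h0]
        split_ifs <;> omega
    · simp [List.pairwise_append, List.pairwise_replicate, List.mem_replicate,
            List.mem_append, and_imp]
      repeat' apply And.intro
      all_goals (intros; omega)
  rw [hsorted]
  simp only [List.reverse_append, List.reverse_replicate, List.append_assoc]

-- ===== VERDICT (by name: the statement is the Claim_ definition above) =====
theorem sorteddigits_spec : Claim_equal_sorteddigits := by
  intro n _
  exact pvMain n
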